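-- pv_equiv track=rewrite | github.com/8r14z/coding-interview-prep | MyIDE.py | get_store_capacity
-- ===== SOURCE A (Python) =====
-- import collections
--
-- Store = collections.namedtuple('Store', 'index capacity')
--
-- def get_store_capacity(s):
--     length = len(s)
--     is_open = False
--
--     sum_array = []
--     running_sum = 0
--     count = 0
--
--     for i in range(length):
--         if s[i] == '|':
--             running_sum += count
--             sum_array.append(Store(i, running_sum))
--             if not is_open: # open
--                 is_open = True
--             else: # close
--                 count = 0
--         else:
--             if is_open: count += 1
--
--     return sum_array
-- ===== SOURCE B (Python) =====
-- import collections
--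
-- Store = collections.namedtuple('Store', 'index capacity')
--
-- def get_store_capacity(s):
--     positions = [i for i, c in enumerate(s) if c == '|']
--     result = []
--     running = 0
--     prev = None
--     for p in positions:
--         if prev is not None:
--             running += p - prev - 1
--         result.append(Store(p, running))
--         prev = p
--     return result
-- ===== Notes on version B (the rewrite author's own statement) =====
-- stated objective: simpler
-- what changed: Replaces A's per-character is_open/count state machine with a two-phase computation: first collect all pipe-character positions with a comprehension, then accumulate the running sum from the gaps between consecutive positions.
import Mathlib
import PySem

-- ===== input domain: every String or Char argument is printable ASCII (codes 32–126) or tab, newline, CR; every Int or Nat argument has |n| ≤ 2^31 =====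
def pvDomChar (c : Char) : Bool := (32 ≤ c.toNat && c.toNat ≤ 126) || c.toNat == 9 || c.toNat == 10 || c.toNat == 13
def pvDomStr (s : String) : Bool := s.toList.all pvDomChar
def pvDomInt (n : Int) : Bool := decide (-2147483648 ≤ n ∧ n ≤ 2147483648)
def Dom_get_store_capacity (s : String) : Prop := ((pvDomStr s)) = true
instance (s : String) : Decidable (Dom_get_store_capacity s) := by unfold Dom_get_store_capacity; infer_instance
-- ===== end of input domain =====

-- B replaces A's per-character is_open/count state machine by a two-phase computation
-- (collect pipe positions, then sum consecutive gaps); objective: simpler.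

-- ===== PORT A =====
-- state: (is_open, sum_array, running_sum, count)
def pvStepA (st : Bool × List (Int × Int) × Int × Int) (ic : Int × Char) :
    Bool × List (Int × Int) × Int × Int :=
  let (is_open, sum_array, running_sum, count) := st
  if ic.2 = '|' then
    let running_sum := running_sum + count
    let sum_array := sum_array ++ [(ic.1, running_sum)]
    if !is_open then (true, sum_array, running_sum, count)
    else (is_open, sum_array, running_sum, 0)
  else
    if is_open then (is_open, sum_array, running_sum, count + 1)
    else (is_open, sum_array, running_sum, count)

def get_store_capacity (s : String) : List (Int × Int) :=
  ((PySem.List.enumerate s.toList 0).foldl pvStepA (false, [], 0, 0)).2.1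

-- ===== PORT B =====
-- state: (result, running, prev)
def pvStepB (st : List (Int × Int) × Int × Option Int) (p : Int) :
    List (Int × Int) × Int × Option Int :=
  let (result, running, prev) := st
  let running := match prev with
    | some q => running + (p - q - 1)
    | none => running
  (result ++ [(p, running)], running, some p)

def get_store_capacity_alt (s : String) : List (Int × Int) :=
  let positions := ((PySem.List.enumerate s.toList 0).filter (fun ic => ic.2 = '|')).map (·.1)
  (positions.foldl pvStepB ([], 0, none)).1

-- ===== PRECONDITION & SPEC =====
def Spec_get_store_capacity (s : String) (out : List (Int × Int)) : Prop := out = get_store_capacity_alt s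
instance (s : String) (out : List (Int × Int)) : Decidable (Spec_get_store_capacity s out) := by unfold Spec_get_store_capacity; infer_instance

-- ===== CLAIM (what is proved, stated in full; the proofs are below) =====
def Claim_equal_get_store_capacity : Prop := ∀ (s : String), Dom_get_store_capacity s → Spec_get_store_capacity s (get_store_capacity s)

-- ===== LEMMAS AND PROOFS =====

-- pipe positions of an enumerated list
def pvPipes (l : List (Int × Char)) : List Int :=
  (l.filter (fun ic => ic.2 = '|')).map (·.1)

-- running-gap chain: q is the previous pipe position
def pvChain : List Int → Int → Int → List (Int × Int)
  | [], _, _ => []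
  | p :: ps, run, q => (p, run + (p - q - 1)) :: pvChain ps (run + (p - q - 1)) p

-- chain with no previous pipe: the first pipe contributes run unchanged
def pvChainF : List Int → Int → List (Int × Int)
  | [], _ => []
  | p :: ps, run => (p, run) :: pvChain ps run p

lemma foldA_open (cs : List Char) : ∀ (i0 : Int) (arr : List (Int × Int)) (rs c : Int),
    ((PySem.List.enumerate cs i0).foldl pvStepA (true, arr, rs, c)).2.1
      = arr ++ pvChain (pvPipes (PySem.List.enumerate cs i0)) rs (i0 - c - 1) := by
  induction cs with
  | nil => intro i0 arr rs c; simp [PySem.List.enumerate_nil, pvPipes, pvChain]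
  | cons x xs ih =>
    intro i0 arr rs c
    rw [PySem.List.enumerate_cons]
    by_cases hx : x = '|'
    · simp only [List.foldl_cons, pvStepA, hx, pvPipes, List.filter_cons, decide_true,
        Bool.not_true, if_true, if_false, Bool.false_eq_true, List.map_cons]
      rw [ih (i0 + 1) (arr ++ [(i0, rs + c)]) (rs + c) 0]
      simp only [pvChain]
      have h1 : rs + (i0 - (i0 - c - 1) - 1) = rs + c := by ring
      have h2 : i0 + 1 - 0 - 1 = i0 := by ring
      rw [h1, h2, List.append_assoc]
      rfl
    · simp only [List.foldl_cons, pvStepA, hx, pvPipes, List.filter_cons, decide_false,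
        if_false, ite_true, Bool.false_eq_true]
      rw [ih (i0 + 1) arr rs (c + 1)]
      have h2 : i0 + 1 - (c + 1) - 1 = i0 - c - 1 := by ring
      simp [pvPipes]

lemma foldA_closed (cs : List Char) : ∀ (i0 : Int) (arr : List (Int × Int)) (rs : Int),
    ((PySem.List.enumerate cs i0).foldl pvStepA (false, arr, rs, 0)).2.1
      = arr ++ pvChainF (pvPipes (PySem.List.enumerate cs i0)) rs := by
  induction cs with
  | nil => intro i0 arr rs; simp [PySem.List.enumerate_nil, pvPipes, pvChainF]
  | cons x xs ih =>
    intro i0 arr rs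
    rw [PySem.List.enumerate_cons]
    by_cases hx : x = '|'
    · simp only [List.foldl_cons, pvStepA, hx, Bool.not_false, if_true]
      rw [foldA_open xs (i0 + 1) (arr ++ [(i0, rs + 0)]) (rs + 0) 0]
      have h2 : i0 + 1 - 0 - 1 = i0 := by ring
      simp only [pvPipes, List.filter_cons, decide_true, pvChainF,
        add_zero, h2, List.append_assoc]
      rfl
    · simp only [List.foldl_cons, pvStepA, hx, if_false, Bool.false_eq_true]
      rw [ih (i0 + 1) arr rs]
      simp [pvPipes, hx]

lemma foldB_some (ps : List Int) : ∀ (res : List (Int × Int)) (run q : Int),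
    (ps.foldl pvStepB (res, run, some q)).1 = res ++ pvChain ps run q := by
  induction ps with
  | nil => intro res run q; simp [pvChain]
  | cons p ps ih =>
    intro res run q
    simp only [List.foldl_cons, pvStepB]
    rw [ih]
    simp [pvChain, List.append_assoc]

lemma foldB_none (ps : List Int) (res : List (Int × Int)) (run : Int) :
    (ps.foldl pvStepB (res, run, none)).1 = res ++ pvChainF ps run := by
  cases ps with
  | nil => simp [pvChainF]
  | cons p ps =>
    simp only [List.foldl_cons, pvStepB]
    rw [foldB_some]
    simp [pvChainF, List.append_assoc]

-- ===== VERDICT (by name: the statement is the Claim_ definition above) =====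
theorem get_store_capacity_spec : Claim_equal_get_store_capacity := by
  intro s _
  unfold Spec_get_store_capacity get_store_capacity get_store_capacity_alt
  rw [foldA_closed s.toList 0 [] 0, foldB_none]
  rfl
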